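-- pv_equiv track=rewrite | github.com/rushikeshwadghane/Python | swap_two_adj.py | distinctAdjacentElement
-- ===== SOURCE A (Python) =====
-- def distinctAdjacentElement(arr):
--     n = len(arr)
--
--     # manual frequency map
--     freq = {}
--     maxFreq = 0
--
--     for x in arr:
--         if x in freq:
--             freq[x] += 1
--         else:
--             freq[x] = 1
--
--         # manually track maximum
--         if freq[x] > maxFreq:
--             maxFreq = freq[x]
--
--     # ceil(n/2) without using math
--     limit = (n + 1) // 2
--
--     if maxFreq <= limit:
--         return True
--     return False
-- ===== SOURCE B (Python) =====
-- def distinctAdjacentElement(arr):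
--     s = sorted(arr)
--     prev = None
--     run = 0
--     best = 0
--     for x in s:
--         if prev is not None and x == prev:
--             run += 1
--         else:
--             run = 1
--         if run > best:
--             best = run
--         prev = x
--     return best <= (len(arr) + 1) // 2
-- ===== Notes on version B (the rewrite author's own statement) =====
-- stated objective: alternative
-- what changed: Replaces the hash frequency map and running maximum with sorting a copy and a single linear scan that tracks the length of the current run of equal adjacent elements; the longest run in the sorted list is the maximum frequency.
import Mathlib
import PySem

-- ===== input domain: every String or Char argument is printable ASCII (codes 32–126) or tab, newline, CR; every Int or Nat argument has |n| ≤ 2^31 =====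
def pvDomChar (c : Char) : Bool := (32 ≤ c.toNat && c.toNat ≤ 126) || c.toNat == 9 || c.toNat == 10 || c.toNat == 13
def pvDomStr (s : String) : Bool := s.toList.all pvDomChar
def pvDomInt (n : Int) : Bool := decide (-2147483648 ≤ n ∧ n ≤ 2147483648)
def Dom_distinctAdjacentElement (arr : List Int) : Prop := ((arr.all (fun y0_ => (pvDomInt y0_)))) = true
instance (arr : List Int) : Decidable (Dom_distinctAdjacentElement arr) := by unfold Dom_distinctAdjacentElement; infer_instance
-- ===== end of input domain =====

-- B replaces A's hash frequency map + running maximum with sorting a copy and one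
-- linear scan over adjacent runs of equal elements (longest run = max frequency);
-- same return value, not claimed faster.

-- ===== PORT A =====
-- loop body of A's for-loop: 'if x in freq: freq[x] += 1 else: freq[x] = 1' then max tracking
def pvStepA (acc : PySem.Dict Int Int × Int) (x : Int) : PySem.Dict Int Int × Int :=
  let freq := if acc.1.contains x then acc.1.modify x 0 (· + 1) else acc.1.insert x 1
  let fx := freq.getD x 0
  (freq, if fx > acc.2 then fx else acc.2)

def distinctAdjacentElement (arr : List Int) : Bool :=
  let n : Int := arr.length
  let st := arr.foldl pvStepA (PySem.Dict.empty, 0)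
  let limit := PySem.Int.floordiv (n + 1) 2
  if st.2 ≤ limit then true else false

-- ===== PORT B =====
-- loop body of B's scan over the sorted copy: state (prev, run, best)
def pvStepB (acc : Option Int × Int × Int) (x : Int) : Option Int × Int × Int :=
  let run := if acc.1 = some x then acc.2.1 + 1 else 1
  let best := if run > acc.2.2 then run else acc.2.2
  (some x, run, best)

def distinctAdjacentElement_alt (arr : List Int) : Bool :=
  let s := PySem.List.sorted arr (fun x => x) false
  let st := s.foldl pvStepB (none, 0, 0)
  decide (st.2.2 ≤ PySem.Int.floordiv ((arr.length : Int) + 1) 2)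

-- ===== PRECONDITION & SPEC =====
def Spec_distinctAdjacentElement (arr : List Int) (out : Bool) : Prop := out = distinctAdjacentElement_alt arr
instance (arr : List Int) (out : Bool) : Decidable (Spec_distinctAdjacentElement arr out) := by unfold Spec_distinctAdjacentElement; infer_instance

-- ===== CLAIM (what is proved, stated in full; the proofs are below) =====
def Claim_equal_distinctAdjacentElement : Prop := ∀ (arr : List Int), Dom_distinctAdjacentElement arr → Spec_distinctAdjacentElement arr (distinctAdjacentElement arr)

-- ===== LEMMAS AND PROOFS =====

-- invariant of A's loop: after processing prefix p, freq is the counter of p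
-- and the accumulator is the maximum count of p (0 for empty p).
lemma pvLoopA_inv (l : List Int) : ∀ (p : List Int) (freq : PySem.Dict Int Int) (m : Int),
    (∀ v, freq.contains v = decide (v ∈ p)) →
    (∀ v, freq.getD v 0 = (p.count v : Int)) →
    (∀ v ∈ p, (p.count v : Int) ≤ m) →
    (m = 0 ∨ ∃ v ∈ p, (p.count v : Int) = m) →
    (∀ v ∈ p ++ l, ((p ++ l).count v : Int) ≤ (l.foldl pvStepA (freq, m)).2) ∧
    ((l.foldl pvStepA (freq, m)).2 = 0 ∨
      ∃ v ∈ p ++ l, ((p ++ l).count v : Int) = (l.foldl pvStepA (freq, m)).2) := by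
  induction l with
  | nil => intro p freq m _ _ h3 h4; simpa using ⟨h3, h4⟩
  | cons x l ih =>
    intro p freq m hc hg h3 h4
    have hstep : pvStepA (freq, m) x =
        (if freq.contains x then freq.modify x 0 (· + 1) else freq.insert x 1,
         if (if freq.contains x then freq.modify x 0 (· + 1) else freq.insert x 1).getD x 0 > m
         then (if freq.contains x then freq.modify x 0 (· + 1) else freq.insert x 1).getD x 0
         else m) := rfl
    set freq' := if freq.contains x then freq.modify x 0 (· + 1) else freq.insert x 1 with hf'
    have hg' : ∀ v, freq'.getD v 0 = ((p ++ [x]).count v : Int) := by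
      intro v
      rw [hf']
      by_cases hx : x ∈ p
      · simp only [hc x, hx, decide_true, if_true, PySem.Dict.getD_modify]
        by_cases hv : v = x
        · subst hv; simp [List.count_append, hg v]
        · simp [hv, List.count_append, Ne.symm hv, hg v]
      · simp only [hc x, hx, decide_false, Bool.false_eq_true, if_false]
        by_cases hv : v = x
        · subst hv
          simp [List.count_append, List.count_eq_zero.mpr hx]
        · simp [PySem.Dict.getD_insert, hv, List.count_append, Ne.symm hv, hg v]
    have hc' : ∀ v, freq'.contains v = decide (v ∈ p ++ [x]) := by
      intro v
      rw [hf']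
      by_cases hx : x ∈ p
      · rw [hc x]; simp only [hx, decide_true, if_true, PySem.Dict.contains_modify, hc v]
        by_cases hv : v = x <;> simp [hv, hx]
      · rw [hc x]; simp only [hx, decide_false, Bool.false_eq_true, if_false]
        by_cases hv : v = x <;> simp [PySem.Dict.contains_insert, hc v, hv]
    have hfx : freq'.getD x 0 = ((p ++ [x]).count x : Int) := hg' x
    have hcx : (p ++ [x]).count x = p.count x + 1 := by simp [List.count_append]
    have hcount : ∀ v, v ≠ x → (p ++ [x]).count v = p.count v := by
      intro v hv; simp [List.count_append, Ne.symm hv]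
    set m' := if freq'.getD x 0 > m then freq'.getD x 0 else m with hm'
    have h3' : ∀ v ∈ p ++ [x], ((p ++ [x]).count v : Int) ≤ m' := by
      intro v hv
      by_cases hvx : v = x
      · subst hvx
        rw [hm']; rw [← hfx]
        split <;> omega
      · have hvp : v ∈ p := by
          rcases List.mem_append.mp hv with h | h
          · exact h
          · simp at h; exact absurd h hvx
        rw [hcount v hvx, hm']
        have := h3 v hvp
        split <;> omega
    have h4' : m' = 0 ∨ ∃ v ∈ p ++ [x], ((p ++ [x]).count v : Int) = m' := by
      right
      rw [hm']
      by_cases hgt : freq'.getD x 0 > m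
      · exact ⟨x, by simp, by rw [if_pos hgt, hfx]⟩
      · rw [if_neg hgt]
        rcases h4 with h0 | ⟨v, hvp, hvm⟩
        · refine ⟨x, by simp, ?_⟩
          exfalso
          rw [hfx] at hgt; rw [hcx] at hgt
          by_cases hx : x ∈ p
          · have := h3 x hx; push_cast at hgt ⊢; omega
          · rw [List.count_eq_zero.mpr hx] at hgt; omega
        · have hvx : v ≠ x := by
            intro h; subst h
            rw [hfx, hcx] at hgt
            push_cast at hgt; omega
          exact ⟨v, List.mem_append_left _ hvp, by rw [hcount v hvx]; exact hvm⟩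
    have := ih (p ++ [x]) freq' m' hc' hg' h3' h4'
    simpa [List.foldl_cons, hstep, List.append_assoc] using this

-- invariant of B's scan: over a sorted list, after processing prefix p the state is
-- (last of p, count of that last element in p, max count of p); the longest run in a
-- sorted list is the maximum frequency.
lemma hcx_count (p : List Int) (x : Int) : (p ++ [x]).count x = p.count x + 1 := by
  simp [List.count_append]

lemma pvLoopB_inv (l : List Int) : ∀ (p : List Int) (prev : Option Int) (run best : Int),
    (p ++ l).Pairwise (· ≤ ·) →
    ((p = [] ∧ prev = none) ∨
      (∃ z, prev = some z ∧ z ∈ p ∧ (∀ v ∈ p, v ≤ z) ∧ run = (p.count z : Int))) →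
    (∀ v ∈ p, (p.count v : Int) ≤ best) →
    (best = 0 ∨ ∃ v ∈ p, (p.count v : Int) = best) →
    (∀ v ∈ p ++ l, ((p ++ l).count v : Int) ≤ (l.foldl pvStepB (prev, run, best)).2.2) ∧
    ((l.foldl pvStepB (prev, run, best)).2.2 = 0 ∨
      ∃ v ∈ p ++ l, ((p ++ l).count v : Int) = (l.foldl pvStepB (prev, run, best)).2.2) := by
  induction l with
  | nil => intro p prev run best _ _ h3 h4; simpa using ⟨h3, h4⟩
  | cons x l ih =>
    intro p prev run best hsorted hprev h3 h4
    have hle : ∀ v ∈ p, v ≤ x := by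
      intro v hv
      have := List.pairwise_append.mp hsorted
      exact this.2.2 v hv x (by simp)
    set run' := if prev = some x then run + 1 else 1 with hr'
    set best' := if run' > best then run' else best with hb'
    have hstep : pvStepB (prev, run, best) x = (some x, run', best') := rfl
    -- count of x in p ++ [x] equals run'
    have hrun' : run' = ((p ++ [x]).count x : Int) := by
      rw [hr']
      rcases hprev with ⟨hp, hpn⟩ | ⟨z, hz, hzp, hzmax, hrun⟩
      · subst hp; simp [hpn]
      · by_cases hxz : prev = some x
        · have hzx : z = x := by rw [hz] at hxz; injection hxz
          subst hzx
          rw [if_pos hxz, hrun, hcx_count p z]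
          push_cast; ring
        · rw [if_neg hxz]
          have hxnp : x ∉ p := by
            intro hxp
            have h1 : x ≤ z := hzmax x hxp
            have h2 : z ≤ x := hle z hzp
            have : x = z := le_antisymm h1 h2
            exact hxz (by rw [hz, this])
          rw [hcx_count p x, List.count_eq_zero.mpr hxnp]
          simp
    have hcount : ∀ v, v ≠ x → (p ++ [x]).count v = p.count v := by
      intro v hv; simp [List.count_append, Ne.symm hv]
    have hprev' : ((p ++ [x]) = [] ∧ (some x : Option Int) = none) ∨
        (∃ z, (some x : Option Int) = some z ∧ z ∈ p ++ [x] ∧ (∀ v ∈ p ++ [x], v ≤ z) ∧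
          run' = ((p ++ [x]).count z : Int)) := by
      right
      refine ⟨x, rfl, by simp, ?_, hrun'⟩
      intro v hv
      rcases List.mem_append.mp hv with h | h
      · exact hle v h
      · simp at h; omega
    have h3' : ∀ v ∈ p ++ [x], ((p ++ [x]).count v : Int) ≤ best' := by
      intro v hv
      by_cases hvx : v = x
      · subst hvx
        rw [← hrun', hb']; split <;> omega
      · have hvp : v ∈ p := by
          rcases List.mem_append.mp hv with h | h
          · exact h
          · simp at h; exact absurd h hvx
        rw [hcount v hvx, hb']
        have := h3 v hvp
        split <;> omega
    have h4' : best' = 0 ∨ ∃ v ∈ p ++ [x], ((p ++ [x]).count v : Int) = best' := by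
      right
      rw [hb']
      by_cases hgt : run' > best
      · exact ⟨x, by simp, by rw [if_pos hgt, ← hrun']⟩
      · rw [if_neg hgt]
        rcases h4 with h0 | ⟨v, hvp, hvm⟩
        · refine ⟨x, by simp, ?_⟩
          exfalso
          have hx1 : (1 : Int) ≤ ((p ++ [x]).count x : Int) := by
            have : 0 < (p ++ [x]).count x := List.count_pos_iff.mpr (by simp)
            exact_mod_cast this
          omega
        · have hvx : v ≠ x := by
            intro h; subst h
            rw [hrun', hcx_count p v] at hgt
            have := hvm
            push_cast at hgt
            omega
          exact ⟨v, List.mem_append_left _ hvp, by rw [hcount v hvx]; exact hvm⟩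
    have hsorted' : ((p ++ [x]) ++ l).Pairwise (· ≤ ·) := by
      simpa [List.append_assoc] using hsorted
    have := ih (p ++ [x]) (some x) run' best' hsorted' hprev' h3' h4'
    simpa [List.foldl_cons, hstep, List.append_assoc] using this

-- ===== VERDICT (by name: the statement is the Claim_ definition above) =====
theorem distinctAdjacentElement_spec : Claim_equal_distinctAdjacentElement := by
  intro arr _
  unfold Spec_distinctAdjacentElement distinctAdjacentElement distinctAdjacentElement_alt
  simp only []
  set limit := PySem.Int.floordiv ((arr.length : Int) + 1) 2 with hl
  obtain ⟨hubA, hexA⟩ := pvLoopA_inv arr [] PySem.Dict.empty 0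
    (by intro v; simp) (by intro v; simp) (by intro v hv; simp at hv) (Or.inl rfl)
  simp only [List.nil_append] at hubA hexA
  set s := PySem.List.sorted arr (fun x => x) false with hs
  have hperm : s.Perm arr := PySem.List.sorted_perm arr _ _
  have hpw : s.Pairwise (· ≤ ·) := by
    have := PySem.List.sorted_pairwise (xs := arr) (key := fun x => x)
    simpa using this
  obtain ⟨hubB, hexB⟩ := pvLoopB_inv s [] none 0 0
    (by simpa using hpw) (Or.inl ⟨rfl, rfl⟩) (by intro v hv; simp at hv) (Or.inl rfl)
  simp only [List.nil_append] at hubB hexB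
  set mA := (arr.foldl pvStepA (PySem.Dict.empty, 0)).2 with hmA
  set mB := (s.foldl pvStepB (none, 0, 0)).2.2 with hmB
  -- counts in s equal counts in arr
  have hcnt : ∀ v, s.count v = arr.count v := fun v => hperm.count_eq v
  have hmem : ∀ v, v ∈ s ↔ v ∈ arr := fun v => hperm.mem_iff
  have hAB : mA = mB := by
    have h1 : mA ≤ mB := by
      rcases hexA with h0 | ⟨v, hv, hvm⟩
      · have : 0 ≤ mB := by
          rcases hexB with h0' | ⟨w, hw, hwm⟩
          · omega
          · have : 0 < s.count w := List.count_pos_iff.mpr hw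
            omega
        omega
      · have := hubB v ((hmem v).mpr hv)
        rw [hcnt v] at this; omega
    have h2 : mB ≤ mA := by
      rcases hexB with h0 | ⟨v, hv, hvm⟩
      · have : 0 ≤ mA := by
          rcases hexA with h0' | ⟨w, hw, hwm⟩
          · omega
          · have : 0 < arr.count w := List.count_pos_iff.mpr hw
            omega
        omega
      · have := hubA v ((hmem v).mp hv)
        rw [hcnt v] at hvm; omega
    omega
  rw [hAB]
  by_cases h : mB ≤ limit <;> simp [h]
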